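-- pv_equiv track=rewrite | github.com/LCccode/wikigraph | lcwiki/validate.py | summarize_issues
-- ===== SOURCE A (Python) =====
-- def summarize_issues(issues: list[str]) -> dict:
--     """Bucket issues by category for reporting."""
--     buckets: dict[str, int] = {
--         "missing_label": 0,
--         "label_is_id_form": 0,
--         "missing_file_type": 0,
--         "duplicate_id": 0,
--         "missing_confidence": 0,
--         "bad_confidence_range": 0,
--         "dangling_edge": 0,
--         "self_loop": 0,
--         "bad_hyperedge": 0,
--         "other": 0,
--     }
--     for issue in issues:
--         if "missing/empty 'label'" in issue:
--             buckets["missing_label"] += 1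
--         elif "looks like an id" in issue:
--             buckets["label_is_id_form"] += 1
--         elif "missing 'file_type'" in issue or "file_type" in issue and "not in allowed" in issue:
--             buckets["missing_file_type"] += 1
--         elif "duplicate id" in issue:
--             buckets["duplicate_id"] += 1
--         elif "missing 'confidence_score'" in issue:
--             buckets["missing_confidence"] += 1
--         elif "confidence_score" in issue and "out of [0,1]" in issue:
--             buckets["bad_confidence_range"] += 1
--         elif "not in node set" in issue:
--             buckets["dangling_edge"] += 1
--         elif "self-loop" in issue:
--             buckets["self_loop"] += 1
--         elif "hyperedge" in issue:
--             buckets["bad_hyperedge"] += 1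
--         else:
--             buckets["other"] += 1
--     return {k: v for k, v in buckets.items() if v > 0}
-- ===== SOURCE B (Python) =====
-- _RULES = [
--     ("missing_label", lambda s: "missing/empty 'label'" in s),
--     ("label_is_id_form", lambda s: "looks like an id" in s),
--     ("missing_file_type", lambda s: "missing 'file_type'" in s or ("file_type" in s and "not in allowed" in s)),
--     ("duplicate_id", lambda s: "duplicate id" in s),
--     ("missing_confidence", lambda s: "missing 'confidence_score'" in s),
--     ("bad_confidence_range", lambda s: "confidence_score" in s and "out of [0,1]" in s),
--     ("dangling_edge", lambda s: "not in node set" in s),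
--     ("self_loop", lambda s: "self-loop" in s),
--     ("bad_hyperedge", lambda s: "hyperedge" in s),
-- ]
--
--
-- def summarize_issues(issues: list[str]) -> dict:
--     """Bucket issues by category: staged partition passes over an ordered rule table.
--
--     Each pass splits the still-unclassified issues on one rule's predicate; whatever
--     survives every pass is 'other'.  First-match semantics falls out of the shrinking
--     worklist, and only non-empty buckets are ever written.
--     """
--     out: dict[str, int] = {}
--     remaining = list(issues)
--     for cat, pred in _RULES:
--         matched = [s for s in remaining if pred(s)]
--         remaining = [s for s in remaining if not pred(s)]
--         if matched:
--             out[cat] = len(matched)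
--     if remaining:
--         out["other"] = len(remaining)
--     return out
-- ===== Notes on version B (the rewrite author's own statement) =====
-- stated objective: alternative
-- what changed: Replaces A's single per-issue pass through an elif ladder over a pre-initialized counter dict by staged partition passes over an ordered rule table: each rule's pass splits the shrinking worklist into matched (bucket written once with its length, only if non-empty) and survivors, and whatever survives all passes is 'other'.
import Mathlib
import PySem

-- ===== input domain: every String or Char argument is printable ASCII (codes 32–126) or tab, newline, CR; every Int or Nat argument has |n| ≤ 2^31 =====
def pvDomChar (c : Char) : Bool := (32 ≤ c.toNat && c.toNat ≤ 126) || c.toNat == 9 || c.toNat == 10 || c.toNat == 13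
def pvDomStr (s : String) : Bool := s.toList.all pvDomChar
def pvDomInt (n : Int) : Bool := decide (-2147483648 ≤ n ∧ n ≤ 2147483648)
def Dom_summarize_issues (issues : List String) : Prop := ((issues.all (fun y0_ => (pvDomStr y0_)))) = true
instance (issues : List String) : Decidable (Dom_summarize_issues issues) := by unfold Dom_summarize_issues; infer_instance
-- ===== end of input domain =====

-- B replaces A's per-issue elif-ladder over a counter dict by staged partition passes over an
-- ordered rule table (each pass splits the shrinking worklist on one rule's predicate; survivors
-- are 'other'; only non-empty buckets are written) — objective: alternative decomposition.

-- ===== PORT A =====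
-- A's loop body: the elif ladder; buckets["k"] += 1 is modify with default 0 (exact: every
-- key used is present in the initial dict, so Python's __getitem__ never raises).
def pvStepA (d : PySem.Dict String Int) (issue : String) : PySem.Dict String Int :=
  if PySem.Str.isIn "missing/empty 'label'" issue then d.modify "missing_label" 0 (· + 1)
  else if PySem.Str.isIn "looks like an id" issue then d.modify "label_is_id_form" 0 (· + 1)
  else if PySem.Str.isIn "missing 'file_type'" issue
       || (PySem.Str.isIn "file_type" issue && PySem.Str.isIn "not in allowed" issue) then
    d.modify "missing_file_type" 0 (· + 1)
  else if PySem.Str.isIn "duplicate id" issue then d.modify "duplicate_id" 0 (· + 1)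
  else if PySem.Str.isIn "missing 'confidence_score'" issue then d.modify "missing_confidence" 0 (· + 1)
  else if PySem.Str.isIn "confidence_score" issue && PySem.Str.isIn "out of [0,1]" issue then
    d.modify "bad_confidence_range" 0 (· + 1)
  else if PySem.Str.isIn "not in node set" issue then d.modify "dangling_edge" 0 (· + 1)
  else if PySem.Str.isIn "self-loop" issue then d.modify "self_loop" 0 (· + 1)
  else if PySem.Str.isIn "hyperedge" issue then d.modify "bad_hyperedge" 0 (· + 1)
  else d.modify "other" 0 (· + 1)

def pvInitBuckets : PySem.Dict String Int :=
  PySem.Dict.ofList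
    [("missing_label", 0), ("label_is_id_form", 0), ("missing_file_type", 0),
     ("duplicate_id", 0), ("missing_confidence", 0), ("bad_confidence_range", 0),
     ("dangling_edge", 0), ("self_loop", 0), ("bad_hyperedge", 0), ("other", 0)]

def summarize_issues (issues : List String) : List (String × Int) :=
  let buckets := issues.foldl pvStepA pvInitBuckets
  -- {k: v for k, v in buckets.items() if v > 0}
  (buckets.items.foldl (fun d p => if p.2 > 0 then d.insert p.1 p.2 else d) PySem.Dict.empty).items

-- ===== PORT B =====
-- the ordered rule table _RULES of Source B
def pvRules : List (String × (String → Bool)) :=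
  [("missing_label", fun s => PySem.Str.isIn "missing/empty 'label'" s),
   ("label_is_id_form", fun s => PySem.Str.isIn "looks like an id" s),
   ("missing_file_type", fun s => PySem.Str.isIn "missing 'file_type'" s
        || (PySem.Str.isIn "file_type" s && PySem.Str.isIn "not in allowed" s)),
   ("duplicate_id", fun s => PySem.Str.isIn "duplicate id" s),
   ("missing_confidence", fun s => PySem.Str.isIn "missing 'confidence_score'" s),
   ("bad_confidence_range", fun s => PySem.Str.isIn "confidence_score" s
        && PySem.Str.isIn "out of [0,1]" s),
   ("dangling_edge", fun s => PySem.Str.isIn "not in node set" s),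
   ("self_loop", fun s => PySem.Str.isIn "self-loop" s),
   ("bad_hyperedge", fun s => PySem.Str.isIn "hyperedge" s)]

-- Source B's loop body: state = (out, remaining); one rule partitions the worklist
def pvStepB (st : PySem.Dict String Int × List String)
    (r : String × (String → Bool)) : PySem.Dict String Int × List String :=
  let matched := st.2.filter r.2
  let remaining := st.2.filter (fun s => !(r.2 s))
  (if matched.isEmpty then st.1 else st.1.insert r.1 (matched.length : Int), remaining)

def summarize_issues_alt (issues : List String) : List (String × Int) :=
  let st := pvRules.foldl pvStepB (PySem.Dict.empty, issues)
  (if st.2.isEmpty then st.1 else st.1.insert "other" (st.2.length : Int)).items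

-- ===== PRECONDITION & SPEC =====
def Spec_summarize_issues (issues : List String) (out : List (String × Int)) : Prop := out = summarize_issues_alt issues
instance (issues : List String) (out : List (String × Int)) : Decidable (Spec_summarize_issues issues out) := by unfold Spec_summarize_issues; infer_instance

-- ===== CLAIM (what is proved, stated in full; the proofs are below) =====
def Claim_equal_summarize_issues : Prop := ∀ (issues : List String), Dom_summarize_issues issues → Spec_summarize_issues issues (summarize_issues issues)

-- ===== LEMMAS AND PROOFS =====

-- Proof-only helper: first-match classification relative to a rule list.
def pvClassifyR : List (String × (String → Bool)) → String → String
  | [], _ => "other"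
  | r :: rs, s => if r.2 s then r.1 else pvClassifyR rs s

def pvCategories : List String := (pvRules.map Prod.fst) ++ ["other"]

-- A's loop body increments exactly the bucket named by first-match classification.
theorem pvStepA_eq_modify_classify (d : PySem.Dict String Int) (i : String) :
    pvStepA d i = d.modify (pvClassifyR pvRules i) 0 (· + 1) := by
  unfold pvStepA pvRules
  simp only [pvClassifyR]
  split_ifs <;> rfl

theorem pvClassifyR_mem (rs : List (String × (String → Bool))) (s : String) :
    pvClassifyR rs s ∈ (rs.map Prod.fst) ++ ["other"] := by
  induction rs with
  | nil => simp [pvClassifyR]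
  | cons r rs ih =>
    by_cases h : r.2 s = true <;> simp only [pvClassifyR, h]
    · simp
    · simp only [Bool.false_eq_true, if_false, List.map_cons, List.cons_append]
      exact List.mem_cons_of_mem _ ih

theorem set_update_of_all_mem (s l : List String) (h : ∀ x ∈ l, x ∈ s) :
    PySem.Set.update s l = s := by
  induction l generalizing s with
  | nil => rfl
  | cons x l ih =>
    have hxs : x ∈ s := h x (by simp)
    calc PySem.Set.update s (x :: l)
        = PySem.Set.update (PySem.Set.add s x) l := rfl
      _ = PySem.Set.update s l := by simp [PySem.Set.add, hxs]
      _ = s := ih s (fun y hy => h y (by simp [hy]))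

-- generic: conditional-insert loop over fresh distinct keys appends the kept pairs
theorem items_foldl_insert_if (l : List (String × Int)) (d : PySem.Dict String Int)
    (hfresh : ∀ p ∈ l, d.contains p.1 = false) (hnodup : (l.map Prod.fst).Nodup) :
    (l.foldl (fun d p => if p.2 > 0 then d.insert p.1 p.2 else d) d).items
      = d.items ++ l.filterMap (fun p => if p.2 > 0 then some p else none) := by
  induction l generalizing d with
  | nil => simp
  | cons p l ih =>
    simp only [List.foldl_cons, List.filterMap_cons, List.map_cons, List.nodup_cons] at *
    by_cases hp : p.2 > 0
    · simp only [if_pos hp]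
      rw [ih (d.insert p.1 p.2)
            (fun q hq => by
              rw [PySem.Dict.contains_insert]
              have hne : q.1 ≠ p.1 := fun he => hnodup.1 (he ▸ List.mem_map_of_mem hq)
              simp [hne, hfresh q (List.mem_cons_of_mem _ hq)])
            hnodup.2]
      rw [PySem.Dict.items_insert_of_not_contains _ _ (hfresh p (by simp))]
      simp
    · simp only [if_neg hp]
      rw [ih d (fun q hq => hfresh q (List.mem_cons_of_mem _ hq)) hnodup.2]

-- B's fold, second component: survivors of every predicate
theorem pvFoldB_snd (rs : List (String × (String → Bool)))
    (d : PySem.Dict String Int) (rem : List String) :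
    (rs.foldl pvStepB (d, rem)).2 = rem.filter (fun s => rs.all (fun r => !(r.2 s))) := by
  induction rs generalizing d rem with
  | nil => simp
  | cons r rs ih =>
    rw [List.foldl_cons,
        show pvStepB (d, rem) r
          = (if (rem.filter r.2).isEmpty then d
             else d.insert r.1 ((rem.filter r.2).length : Int),
             rem.filter (fun s => !(r.2 s))) from rfl,
        ih, List.filter_filter]
    apply List.filter_congr
    intro s _
    simp [Bool.and_comm]

-- survivors are exactly the strings classified 'other' (no rule is named 'other')
theorem classifyR_other_iff (rs : List (String × (String → Bool))) (s : String)
    (hno : ∀ r ∈ rs, r.1 ≠ "other") :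
    (pvClassifyR rs s = "other") ↔ rs.all (fun r => !(r.2 s)) = true := by
  induction rs with
  | nil => simp [pvClassifyR]
  | cons r rs ih =>
    by_cases h : r.2 s = true <;> simp only [pvClassifyR, h, List.all_cons]
    · simp only [if_true, Bool.not_true, Bool.false_and, Bool.false_eq_true, iff_false]
      exact hno r (by simp)
    · simp only [Bool.false_eq_true, if_false, Bool.not_false, Bool.true_and]
      exact ih (fun q hq => hno q (List.mem_cons_of_mem _ hq))

-- B's fold never creates a key outside its rule names
theorem pvFoldB_contains (rs : List (String × (String → Bool)))
    (d : PySem.Dict String Int) (rem : List String) (k : String)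
    (hd : d.contains k = false) (hk : ∀ r ∈ rs, r.1 ≠ k) :
    (rs.foldl pvStepB (d, rem)).1.contains k = false := by
  induction rs generalizing d rem with
  | nil => simpa using hd
  | cons r rs ih =>
    rw [List.foldl_cons]
    apply ih
    · show (if (rem.filter r.2).isEmpty then d
            else d.insert r.1 ((rem.filter r.2).length : Int)).contains k = false
      split_ifs
      · exact hd
      · rw [PySem.Dict.contains_insert]
        have hne : r.1 ≠ k := hk r (by simp)
        simp [hd, Ne.symm hne]
    · exact fun q hq => hk q (List.mem_cons_of_mem _ hq)

-- the entry list B's staged passes produce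
def pvEntries : List (String × (String → Bool)) → List String → List (String × Int)
  | [], _ => []
  | r :: rs, rem =>
      (if (rem.filter r.2).isEmpty then [] else [(r.1, ((rem.filter r.2).length : Int))])
        ++ pvEntries rs (rem.filter (fun s => !(r.2 s)))

-- B's fold, first component: d plus the staged entries
theorem pvFoldB_fst_items (rs : List (String × (String → Bool)))
    (d : PySem.Dict String Int) (rem : List String)
    (hfresh : ∀ r ∈ rs, d.contains r.1 = false) (hnodup : (rs.map Prod.fst).Nodup) :
    (rs.foldl pvStepB (d, rem)).1.items = d.items ++ pvEntries rs rem := by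
  induction rs generalizing d rem with
  | nil => simp [pvEntries]
  | cons r rs ih =>
    simp only [List.map_cons, List.nodup_cons] at hnodup
    rw [List.foldl_cons,
        show pvStepB (d, rem) r
          = (if (rem.filter r.2).isEmpty then d
             else d.insert r.1 ((rem.filter r.2).length : Int),
             rem.filter (fun s => !(r.2 s))) from rfl]
    by_cases he : (rem.filter r.2).isEmpty
    · rw [if_pos he]
      rw [ih d _ (fun q hq => hfresh q (List.mem_cons_of_mem _ hq)) hnodup.2]
      simp [pvEntries, he]
    · rw [if_neg he]
      rw [ih _ _
            (fun q hq => by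
              rw [PySem.Dict.contains_insert]
              have hne : q.1 ≠ r.1 := fun h => hnodup.1 (h ▸ List.mem_map_of_mem hq)
              simp [hne, hfresh q (List.mem_cons_of_mem _ hq)])
            hnodup.2]
      rw [PySem.Dict.items_insert_of_not_contains _ _ (hfresh r (by simp))]
      simp [pvEntries, he]

-- staged entries = first-match counts, rule by rule
theorem pvEntries_eq_filterMap (rs : List (String × (String → Bool))) (rem : List String)
    (hnodup : (rs.map Prod.fst).Nodup) (hno : ∀ r ∈ rs, r.1 ≠ "other") :
    pvEntries rs rem
      = rs.filterMap (fun r =>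
          if (rem.filter (fun s => pvClassifyR rs s == r.1)).isEmpty then none
          else some (r.1, ((rem.filter (fun s => pvClassifyR rs s == r.1)).length : Int))) := by
  induction rs generalizing rem with
  | nil => simp [pvEntries]
  | cons r rs ih =>
    simp only [List.map_cons, List.nodup_cons] at hnodup
    have hhead : rem.filter (fun s => pvClassifyR (r :: rs) s == r.1) = rem.filter r.2 := by
      apply List.filter_congr
      intro s _
      by_cases h : r.2 s = true
      · simp [pvClassifyR, h]
      · rw [Bool.not_eq_true] at h
        simp only [pvClassifyR, h, Bool.false_eq_true, if_false]
        rcases List.mem_append.mp (pvClassifyR_mem rs s) with hm | hm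
        · exact beq_eq_false_iff_ne.mpr (fun hc => hnodup.1 (hc ▸ hm))
        · simp only [List.mem_singleton] at hm
          exact beq_eq_false_iff_ne.mpr (fun hc => hno r (by simp) (hc ▸ hm))
    have htail : ∀ q ∈ rs,
        rem.filter (fun s => pvClassifyR (r :: rs) s == q.1)
          = (rem.filter (fun s => !(r.2 s))).filter (fun s => pvClassifyR rs s == q.1) := by
      intro q hq
      rw [List.filter_filter]
      apply List.filter_congr
      intro s _
      by_cases h : r.2 s = true
      · have hne : r.1 ≠ q.1 := fun hc => hnodup.1 (hc ▸ List.mem_map_of_mem hq)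
        simp [pvClassifyR, h, hne]
      · rw [Bool.not_eq_true] at h
        simp [pvClassifyR, h]
    have htailFM :
        pvEntries rs (rem.filter (fun s => !(r.2 s)))
          = rs.filterMap (fun q =>
              if (rem.filter (fun s => pvClassifyR (r :: rs) s == q.1)).isEmpty then none
              else some (q.1, ((rem.filter (fun s => pvClassifyR (r :: rs) s == q.1)).length : Int))) := by
      rw [ih _ hnodup.2 (fun q hq => hno q (List.mem_cons_of_mem _ hq))]
      apply List.filterMap_congr
      intro q hq
      rw [htail q hq]
    rw [show pvEntries (r :: rs) rem
        = (if (rem.filter r.2).isEmpty then []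
           else [(r.1, ((rem.filter r.2).length : Int))])
          ++ pvEntries rs (rem.filter (fun s => !(r.2 s))) from rfl, htailFM]
    by_cases he : (rem.filter r.2).isEmpty
    · rw [List.filterMap_cons_none (by simp [hhead, he]), if_pos he, List.nil_append]
    · rw [List.filterMap_cons_some (b := (r.1, ((rem.filter r.2).length : Int))) (by rw [hhead]; simp [he]), if_neg he,
          List.singleton_append]

-- counts of the classification list, as filters
theorem count_map_classify (issues : List String) (c : String) :
    ((issues.map (pvClassifyR pvRules)).count c : Int)
      = ((issues.filter (fun s => pvClassifyR pvRules s == c)).length : Int) := by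
  rw [List.count_eq_countP, List.countP_map, List.countP_eq_length_filter]
  norm_cast

-- A reduced to: per-category counts over the classification list, filtered to positives
theorem summarize_issues_eq_canonical (issues : List String) :
    summarize_issues issues
      = pvCategories.filterMap (fun c =>
          if ((issues.map (pvClassifyR pvRules)).count c : Int) > 0
          then some (c, ((issues.map (pvClassifyR pvRules)).count c : Int)) else none) := by
  simp only [summarize_issues]
  have hfun : pvStepA = fun d i => d.modify (pvClassifyR pvRules i) 0 (· + 1) := by
    funext d i; exact pvStepA_eq_modify_classify d i
  rw [hfun]
  rw [show issues.foldl (fun d i => d.modify (pvClassifyR pvRules i) 0 (· + 1)) pvInitBuckets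
        = (issues.map (pvClassifyR pvRules)).foldl (fun d c => d.modify c 0 (· + 1)) pvInitBuckets
      from (List.foldl_map (f := pvClassifyR pvRules)
        (g := fun (d : PySem.Dict String Int) (c : String) => d.modify c 0 (· + 1))).symm]
  set cats := issues.map (pvClassifyR pvRules) with hcats
  set buckets := cats.foldl (fun d c => d.modify c 0 (· + 1)) pvInitBuckets with hbuckets
  have hmem : ∀ c ∈ cats, c ∈ pvCategories := by
    intro c hc
    rw [hcats] at hc
    obtain ⟨i, _, rfl⟩ := List.mem_map.mp hc
    exact pvClassifyR_mem pvRules i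
  have hkeys : buckets.keys = pvCategories := by
    rw [hbuckets, PySem.Dict.keys_foldl_modify]
    have : pvInitBuckets.keys = pvCategories := by decide
    rw [this]
    exact set_update_of_all_mem _ _ hmem
  have hitems : buckets.items = pvCategories.map (fun c => (c, buckets.getD c 0)) := by
    rw [PySem.Dict.items_eq_map_keys buckets (by rw [hkeys]; decide) 0, hkeys]
  have hinit : ∀ c ∈ pvCategories, pvInitBuckets.getD c 0 = 0 := by decide
  have hgetD : ∀ c ∈ pvCategories, buckets.getD c 0 = (cats.count c : Int) := by
    intro c hc
    rw [hbuckets, PySem.Dict.getD_foldl_modify_add_one, hinit c hc, zero_add]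
  rw [hitems]
  have hfst : (pvCategories.map (fun c => (c, buckets.getD c 0))).map Prod.fst = pvCategories := by
    rw [List.map_map]
    exact List.map_id _
  rw [items_foldl_insert_if _ _ (by simp) (by rw [hfst]; decide)]
  rw [show PySem.Dict.empty.items = ([] : List (String × Int)) from rfl, List.nil_append,
      List.filterMap_map]
  apply List.filterMap_congr
  intro c hc
  simp only [Function.comp]
  rw [hgetD c hc]

-- B's survivors are exactly the strings classified 'other'
theorem filter_other_eq (issues : List String) :
    issues.filter (fun s => pvClassifyR pvRules s == "other")
      = issues.filter (fun s => pvRules.all (fun r => !(r.2 s))) := by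
  apply List.filter_congr
  intro s _
  by_cases hA : pvRules.all (fun r => !(r.2 s)) = true
  · rw [hA]
    exact beq_iff_eq.mpr ((classifyR_other_iff pvRules s (by decide)).mpr hA)
  · rw [Bool.not_eq_true] at hA
    rw [hA]
    exact beq_eq_false_iff_ne.mpr
      (fun hc => by rw [(classifyR_other_iff pvRules s (by decide)).mp hc] at hA; exact absurd hA (by simp))

theorem summarize_issues_eq_alt (issues : List String) :
    summarize_issues issues = summarize_issues_alt issues := by
  rw [summarize_issues_eq_canonical]
  simp only [summarize_issues_alt]
  have hnodup : (pvRules.map Prod.fst).Nodup := by decide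
  have hno : ∀ r ∈ pvRules, r.1 ≠ "other" := by decide
  have hitemsB : (pvRules.foldl pvStepB (PySem.Dict.empty, issues)).1.items
      = pvRules.filterMap (fun r =>
          if (issues.filter (fun s => pvClassifyR pvRules s == r.1)).isEmpty then none
          else some (r.1, ((issues.filter (fun s => pvClassifyR pvRules s == r.1)).length : Int))) := by
    rw [pvFoldB_fst_items pvRules PySem.Dict.empty issues (by simp) hnodup,
        show PySem.Dict.empty.items = ([] : List (String × Int)) from rfl, List.nil_append,
        pvEntries_eq_filterMap pvRules issues hnodup hno]
  have hcontains : (pvRules.foldl pvStepB (PySem.Dict.empty, issues)).1.contains "other" = false :=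
    pvFoldB_contains pvRules PySem.Dict.empty issues "other" (by simp) hno
  rw [show pvCategories = pvRules.map Prod.fst ++ ["other"] from rfl,
      List.filterMap_append, List.filterMap_map]
  rw [pvFoldB_snd]
  by_cases hemp : (issues.filter (fun s => pvRules.all (fun r => !(r.2 s)))).isEmpty
  · rw [if_pos hemp, hitemsB]
    have hnil : issues.filter (fun s => pvRules.all (fun r => !(r.2 s))) = [] :=
      List.isEmpty_iff.mp hemp
    have hcnt0 : (issues.map (pvClassifyR pvRules)).count "other" = 0 := by
      have := count_map_classify issues "other"
      rw [filter_other_eq, hnil] at this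
      exact_mod_cast this
    rw [show List.filterMap (fun c =>
          if ((issues.map (pvClassifyR pvRules)).count c : Int) > 0
          then some (c, ((issues.map (pvClassifyR pvRules)).count c : Int)) else none) ["other"]
        = [] from by simp only [List.filterMap]; rw [hcnt0]; simp, List.append_nil]
    apply List.filterMap_congr
    intro r hr
    simp only [Function.comp]
    rw [count_map_classify]
    by_cases hE : (issues.filter (fun s => pvClassifyR pvRules s == r.1)).isEmpty
    · rw [if_neg (by rw [List.isEmpty_iff.mp hE]; simp), if_pos hE]
    · have hpos : 0 < (issues.filter (fun s => pvClassifyR pvRules s == r.1)).length := by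
        rcases hF : issues.filter (fun s => pvClassifyR pvRules s == r.1) with _ | ⟨x, xs⟩
        · exact absurd (by rw [hF]; rfl) hE
        · simp
      rw [if_pos (by exact_mod_cast hpos), if_neg hE]
  · rw [if_neg hemp, PySem.Dict.items_insert_of_not_contains _ _ hcontains, hitemsB]
    have hlenpos : 0 < (issues.filter (fun s => pvRules.all (fun r => !(r.2 s)))).length := by
      rcases hF : issues.filter (fun s => pvRules.all (fun r => !(r.2 s))) with _ | ⟨x, xs⟩
      · exact absurd (by rw [hF]; rfl) hemp
      · simp
    have hcnt : ((issues.map (pvClassifyR pvRules)).count "other" : Int)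
        = ((issues.filter (fun s => pvRules.all (fun r => !(r.2 s)))).length : Int) := by
      rw [count_map_classify, filter_other_eq]
    congr 1
    · apply List.filterMap_congr
      intro r hr
      simp only [Function.comp]
      rw [count_map_classify]
      by_cases hE : (issues.filter (fun s => pvClassifyR pvRules s == r.1)).isEmpty
      · rw [if_neg (by rw [List.isEmpty_iff.mp hE]; simp), if_pos hE]
      · have hpos : 0 < (issues.filter (fun s => pvClassifyR pvRules s == r.1)).length := by
          rcases hF : issues.filter (fun s => pvClassifyR pvRules s == r.1) with _ | ⟨x, xs⟩
          · exact absurd (by rw [hF]; rfl) hE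
          · simp
        rw [if_pos (by exact_mod_cast hpos), if_neg hE]
    · have h0 : ((issues.map (pvClassifyR pvRules)).count "other" : Int) > 0 := by
        rw [hcnt]; exact_mod_cast hlenpos
      simp only [List.filterMap]
      rw [if_pos h0, hcnt]

-- ===== VERDICT (by name: the statement is the Claim_ definition above) =====
theorem summarize_issues_spec : Claim_equal_summarize_issues := by
  intro issues _
  unfold Spec_summarize_issues
  exact summarize_issues_eq_alt issues
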